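-- pv_equiv track=rewrite | github.com/Necro-Dragon/Lichess-ELO-Predictor | scripts/render_charts.py | aggregate_rating_bins
-- ===== SOURCE A (Python) =====
-- def aggregate_rating_bins(counts: list[int], bin_size: int = 50) -> list[dict[str, int]]:
--     nonzero_ratings = [rating for rating, count in enumerate(counts) if count]
--     if not nonzero_ratings:
--         return []
--
--     lower = (min(nonzero_ratings) // bin_size) * bin_size
--     upper = ((max(nonzero_ratings) + bin_size - 1) // bin_size) * bin_size
--     bins: list[dict[str, int]] = []
--     for start in range(lower, upper + 1, bin_size):
--         end = min(start + bin_size - 1, len(counts) - 1)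
--         count = sum(counts[start : end + 1])
--         bins.append({"start": start, "end": end, "count": count})
--     return bins
-- ===== SOURCE B (Python) =====
-- def aggregate_rating_bins(counts: list[int], bin_size: int = 50) -> list[dict[str, int]]:
--     prefix = [0]
--     for c in counts:
--         prefix.append(prefix[-1] + c)
--     lo = hi = -1
--     for i, c in enumerate(counts):
--         if c:
--             hi = i
--             if lo < 0:
--                 lo = i
--     if lo < 0:
--         return []
--
--     n = len(counts)
--     lower = lo // bin_size * bin_size
--     upper = (hi + bin_size - 1) // bin_size * bin_size
--
--     def bin_at(start: int) -> dict[str, int]: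
--         end = min(start + bin_size - 1, n - 1)
--         return {"start": start, "end": end,
--                 "count": prefix[end + 1] - prefix[min(start, end + 1)]}
--
--     return [bin_at(start) for start in range(lower, upper + 1, bin_size)]
-- ===== Notes on version B (the rewrite author's own statement) =====
-- stated objective: alternative
-- what changed: B replaces A's materialised nonzero-index list with min/max and its per-bin slice-and-sum with a single prefix-sum array plus one pass that tracks the first and last nonzero index, reading each bin's count as a prefix difference.
-- outside the precondition, e.g. on aggregate_rating_bins([161, 7], -1000000): A returns [{'start': 0, 'end': -1000001, 'count': 0}], B raises IndexError; on aggregate_rating_bins([0, 0], 0): A returns [], B returns []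
import Mathlib
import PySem

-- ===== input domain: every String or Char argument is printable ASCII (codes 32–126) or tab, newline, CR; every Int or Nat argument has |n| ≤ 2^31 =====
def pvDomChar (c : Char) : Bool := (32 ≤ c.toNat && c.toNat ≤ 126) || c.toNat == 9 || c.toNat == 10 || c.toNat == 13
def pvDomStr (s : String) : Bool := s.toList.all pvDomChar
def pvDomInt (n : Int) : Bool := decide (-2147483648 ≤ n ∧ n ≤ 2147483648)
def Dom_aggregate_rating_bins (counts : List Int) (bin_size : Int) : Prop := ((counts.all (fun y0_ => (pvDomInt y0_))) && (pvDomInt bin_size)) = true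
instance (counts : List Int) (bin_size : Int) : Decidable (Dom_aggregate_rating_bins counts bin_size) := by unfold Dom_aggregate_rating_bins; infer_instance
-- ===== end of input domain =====

-- B replaces A's nonzero-index list + min/max + per-bin slice-and-sum by a prefix-sum list and a
-- single scan tracking the first and last nonzero index; same bins, counts read as prefix differences.

-- ===== PORT A =====
def aggregate_rating_bins (counts : List Int) (bin_size : Int) : List (List (String × Int)) :=
  let nonzero_ratings := ((PySem.List.enumerate counts 0).filter (fun p => decide (p.2 ≠ 0))).map Prod.fst
  if nonzero_ratings = [] then []
  else
    match PySem.List.min? nonzero_ratings (fun x => x), PySem.List.max? nonzero_ratings (fun x => x) with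
    | some mn, some mx =>
      let lower := PySem.Int.floordiv mn bin_size * bin_size
      let upper := PySem.Int.floordiv (mx + bin_size - 1) bin_size * bin_size
      (PySem.List.pyRange lower (upper + 1) bin_size).foldl
        (fun bins start =>
          let e := min (start + bin_size - 1) ((counts.length : Int) - 1)
          let cnt := (PySem.List.slice counts (some start) (some (e + 1))).sum
          bins ++ [[("start", start), ("end", e), ("count", cnt)]])
        []
    | _, _ => []

-- ===== PORT B =====
def aggregate_rating_bins_alt (counts : List Int) (bin_size : Int) : List (List (String × Int)) :=
  let pre := counts.foldl (fun p c => p ++ [p.getLastD 0 + c]) [0]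
  let lh := (PySem.List.enumerate counts 0).foldl
      (fun (lh : Int × Int) p =>
        if p.2 ≠ 0 then ((if lh.1 < 0 then p.1 else lh.1), p.1) else lh)
      (-1, -1)
  if lh.1 < 0 then []
  else
    let n : Int := counts.length
    let lower := PySem.Int.floordiv lh.1 bin_size * bin_size
    let upper := PySem.Int.floordiv (lh.2 + bin_size - 1) bin_size * bin_size
    (PySem.List.pyRange lower (upper + 1) bin_size).map (fun start =>
      let e := min (start + bin_size - 1) (n - 1)
      [("start", start), ("end", e), ("count",
        PySem.List.pyGetD pre (e + 1) 0 - PySem.List.pyGetD pre (min start (e + 1)) 0)])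

-- ===== PRECONDITION & SPEC =====
-- Pre_ excludes bin_size ≤ 0, outside the function's natural domain: at bin_size = 0 A raises
-- ZeroDivisionError whenever some count is nonzero, and a negative bin_size yields accidental bins
-- from floor division and negative-index slice wraparound.
def Pre_aggregate_rating_bins (counts : List Int) (bin_size : Int) : Prop := 1 ≤ bin_size
instance (counts : List Int) (bin_size : Int) : Decidable (Pre_aggregate_rating_bins counts bin_size) := by unfold Pre_aggregate_rating_bins; infer_instance
def pvWitness_aggregate_rating_bins : List Int × Int := ([0, 1, 0, 2], 2)
def Spec_aggregate_rating_bins (counts : List Int) (bin_size : Int) (out : List (List (String × Int))) : Prop := out = aggregate_rating_bins_alt counts bin_size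
instance (counts : List Int) (bin_size : Int) (out : List (List (String × Int))) : Decidable (Spec_aggregate_rating_bins counts bin_size out) := by unfold Spec_aggregate_rating_bins; infer_instance

-- ===== CLAIM (what is proved, stated in full; the proofs are below) =====
def Claim_equal_aggregate_rating_bins : Prop := ∀ (counts : List Int) (bin_size : Int), Dom_aggregate_rating_bins counts bin_size → Pre_aggregate_rating_bins counts bin_size → Spec_aggregate_rating_bins counts bin_size (aggregate_rating_bins counts bin_size)

-- ===== LEMMAS AND PROOFS =====

-- A's nonzero_ratings list, as a recursive function (proof helper)
def pvNZ : List Int → Int → List Int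
  | [], _ => []
  | c :: t, s => if c ≠ 0 then s :: pvNZ t (s + 1) else pvNZ t (s + 1)

lemma pvNZ_eq (counts : List Int) (s : Int) :
    ((PySem.List.enumerate counts s).filter (fun p => decide (p.2 ≠ 0))).map Prod.fst = pvNZ counts s := by
  induction counts generalizing s with
  | nil => simp [pvNZ, PySem.List.enumerate_nil]
  | cons c t ih =>
    have ih' := ih (s + 1)
    simp only [PySem.List.enumerate_cons, List.filter_cons, pvNZ]
    by_cases hc : c ≠ 0 <;> simp [hc] <;> simpa using ih'

lemma pvNZ_mem_ge {counts : List Int} {s x : Int} (hx : x ∈ pvNZ counts s) : s ≤ x := by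
  induction counts generalizing s with
  | nil => simp [pvNZ] at hx
  | cons c t ih =>
    simp only [pvNZ] at hx
    by_cases hc : c ≠ 0
    · rw [if_pos hc] at hx
      rcases List.mem_cons.mp hx with h | h
      · omega
      · have := ih h; omega
    · rw [if_neg hc] at hx
      have := ih hx; omega

lemma pvNZ_pairwise (counts : List Int) (s : Int) : (pvNZ counts s).Pairwise (· < ·) := by
  induction counts generalizing s with
  | nil => simp [pvNZ]
  | cons c t ih =>
    simp only [pvNZ]
    by_cases hc : c ≠ 0
    · rw [if_pos hc]
      exact List.Pairwise.cons (fun y hy => by have := pvNZ_mem_ge hy; omega) (ih (s + 1))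
    · rw [if_neg hc]; exact ih (s + 1)

-- B's lo/hi scan computes head and last of pvNZ
lemma pvLH (counts : List Int) : ∀ (s l h : Int), 0 ≤ s →
    (PySem.List.enumerate counts s).foldl
      (fun (lh : Int × Int) p => if p.2 ≠ 0 then ((if lh.1 < 0 then p.1 else lh.1), p.1) else lh) (l, h)
    = (if pvNZ counts s = [] then (l, h)
       else ((if l < 0 then (pvNZ counts s).headI else l), (pvNZ counts s).getLastD 0)) := by
  induction counts with
  | nil => intro s l h _; simp [pvNZ, PySem.List.enumerate_nil]
  | cons c t ih =>
    intro s l h hs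
    simp only [PySem.List.enumerate_cons, List.foldl_cons, pvNZ]
    by_cases hc : c ≠ 0
    · rw [if_pos hc, if_pos hc]
      rw [ih (s + 1) _ _ (by omega)]
      by_cases ht : pvNZ t (s + 1) = []
      · simp [ht]
      · obtain ⟨a, b, hab⟩ := List.exists_cons_of_ne_nil ht
        rw [hab]
        have hs' : ¬ s < 0 := by omega
        by_cases hl : l < 0
        · simp [hl, hs', List.getLastD]
        · simp [hl, List.getLastD]
    · rw [if_neg hc, if_neg hc]
      exact ih (s + 1) l h (by omega)

lemma foldl_min_eq (t : List Int) : ∀ (x : Int), (∀ y ∈ t, x ≤ y) → t.foldl min x = x := by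
  induction t with
  | nil => intro x _; rfl
  | cons y t ih =>
    intro x hx
    simp only [List.foldl_cons]
    have h1 : min x y = x := by have := hx y (by simp); omega
    rw [h1]
    exact ih x (fun z hz => hx z (by simp [hz]))

lemma foldl_max_eq (t : List Int) : ∀ (x : Int), (x :: t).Pairwise (· < ·) →
    t.foldl max x = (x :: t).getLastD 0 := by
  induction t with
  | nil => intro x _; rfl
  | cons y t ih =>
    intro x hp
    simp only [List.foldl_cons]
    have hxy : x < y := (List.pairwise_cons.mp hp).1 y (by simp)
    have h1 : max x y = y := by omega
    rw [h1, ih y (List.pairwise_cons.mp hp).2]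
    simp [List.getLastD]

-- partial sums (proof helper)
def pvSums : Int → List Int → List Int
  | _, [] => []
  | a, c :: t => (a + c) :: pvSums (a + c) t

lemma foldl_prefix (xs : List Int) : ∀ (p : List Int), p ≠ [] →
    xs.foldl (fun p c => p ++ [p.getLastD 0 + c]) p = p ++ pvSums (p.getLastD 0) xs := by
  induction xs with
  | nil => intro p _; simp [pvSums]
  | cons c t ih =>
    intro p hp
    simp only [List.foldl_cons, pvSums]
    rw [ih (p ++ [p.getLastD 0 + c]) (by simp)]
    have hlast : (p ++ [p.getLastD 0 + c]).getLastD 0 = p.getLastD 0 + c := by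
      simp
    rw [hlast]
    simp

lemma getD_sums (xs : List Int) : ∀ (a : Int) (k : Nat), k ≤ xs.length →
    (a :: pvSums a xs).getD k 0 = a + (xs.take k).sum := by
  induction xs with
  | nil =>
    intro a k hk
    have : k = 0 := by simpa using hk
    subst this; simp
  | cons c t ih =>
    intro a k hk
    cases k with
    | zero => simp
    | succ k =>
      simp only [pvSums, List.getD_cons_succ]
      rw [ih (a + c) k (by simpa using hk)]
      simp [List.take_succ_cons]
      ring

lemma slice_sum (xs : List Int) (a b : Int) (ha : 0 ≤ a) (hb : 0 ≤ b) :
    (PySem.List.slice xs (some a) (some b)).sum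
      = (xs.take b.toNat).sum - (xs.take (min a b).toNat).sum := by
  rw [PySem.List.slice_toNat xs ha hb]
  by_cases hab : a ≤ b
  · rw [min_eq_left hab]
    have h2 : b.toNat = a.toNat + (b.toNat - a.toNat) := by omega
    have h3 : List.take b.toNat xs = List.take a.toNat xs ++ List.take (b.toNat - a.toNat) (List.drop a.toNat xs) := by
      conv_lhs => rw [h2]
      exact List.take_add
    rw [h3, List.sum_append]
    ring
  · have hba : b < a := by omega
    have h0 : b.toNat - a.toNat = 0 := by omega
    rw [min_eq_right (le_of_lt hba), h0]
    simp

lemma foldl_concat_eq_map {α β : Type} (xs : List α) (f : α → β) : ∀ (init : List β),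
    xs.foldl (fun acc x => acc ++ [f x]) init = init ++ xs.map f := by
  induction xs with
  | nil => intro init; simp
  | cons x t ih => intro init; simp only [List.foldl_cons, List.map_cons]; rw [ih]; simp

-- ===== VERDICT (by name: the statement is the Claim_ definition above) =====
theorem aggregate_rating_bins_spec : Claim_equal_aggregate_rating_bins := by
  intro counts bin_size _ hpre
  have hbs : (0:Int) < bin_size := hpre
  unfold Spec_aggregate_rating_bins aggregate_rating_bins aggregate_rating_bins_alt
  simp only [pvNZ_eq counts 0]
  rw [pvLH counts 0 (-1) (-1) le_rfl]
  by_cases hnzE : pvNZ counts 0 = []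
  · simp [hnzE]
  · obtain ⟨x, t, heq⟩ := List.exists_cons_of_ne_nil hnzE
    rw [heq]
    have hx0 : (0:Int) ≤ x := pvNZ_mem_ge (heq ▸ (List.mem_cons_self : x ∈ x :: t))
    have hpw : (x :: t).Pairwise (· < · : Int → Int → Prop) := heq ▸ pvNZ_pairwise counts 0
    have hne : counts ≠ [] := by
      intro h; rw [h] at heq; simp [pvNZ] at heq
    have hn1 : (1:Int) ≤ counts.length := by
      have h := List.length_pos_of_ne_nil hne
      omega
    have hmin : PySem.List.min? (x :: t) (fun y => y) = some x := by
      rw [PySem.List.min?_id_cons]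
      have := foldl_min_eq t x (fun y hy => le_of_lt ((List.pairwise_cons.mp hpw).1 y hy))
      rw [this]
    have hL : PySem.List.max? (x :: t) (fun y => y) = some ((x :: t).getLastD 0) := by
      rw [PySem.List.max?_id_cons]
      rw [foldl_max_eq t x hpw]
    rw [hmin, hL]
    have hconsne : ¬(x :: t) = [] := by simp
    have hfst : (if (-1:Int) < 0 then x else -1) = x := by norm_num
    simp only [if_neg hconsne, List.headI_cons, hfst]
    rw [if_neg (by omega : ¬ x < 0)]
    rw [foldl_concat_eq_map]
    rw [List.nil_append]
    -- prefix list
    have hpre0 : counts.foldl (fun p c => p ++ [p.getLastD 0 + c]) [0] = 0 :: pvSums 0 counts := by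
      rw [foldl_prefix counts [0] (by simp)]
      rfl
    rw [hpre0]
    apply List.map_congr_left
    intro start hstart
    have hlow : 0 ≤ PySem.Int.floordiv x bin_size * bin_size := by
      rw [PySem.Int.floordiv_eq_ediv_of_pos hbs]
      exact mul_nonneg (Int.ediv_nonneg hx0 (le_of_lt hbs)) (le_of_lt hbs)
    have hs0 : 0 ≤ start := by
      have hmem := (PySem.List.mem_pyRange_iff_of_pos hbs start).mp hstart
      omega
    -- the bin end
    set n : Int := (counts.length : Int) with hn
    set e : Int := min (start + bin_size - 1) (n - 1) with he
    have he0 : 0 ≤ e := by omega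
    have hen : e + 1 ≤ n := by omega
    have hgd : ∀ (i : Int), 0 ≤ i → i ≤ n →
        PySem.List.pyGetD (0 :: pvSums 0 counts) i 0 = (counts.take i.toNat).sum := by
      intro i h0 hle
      have hcast : i = ((i.toNat : Nat) : Int) := by omega
      rw [hcast, PySem.List.pyGetD_natCast]
      rw [getD_sums counts 0 i.toNat (by omega)]
      simp
      have hmx : (max i 0).toNat = i.toNat := by omega
      rw [hmx]
    rw [hgd (e + 1) (by omega) hen]
    rw [hgd (min start (e + 1)) (by omega) (by omega)]
    rw [slice_sum counts start (e + 1) hs0 (by omega)]
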